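-- pv_equiv track=rewrite | github.com/ShumanLuo/DOE-9355-Project | Task 6/DNN_EM_SERVER_OG.py | remove_numbers
-- ===== SOURCE A (Python) =====
-- def remove_numbers(numbers):
--     multiples_of_670 = [i for i in range(0, max(numbers), 670) if i != 0]
--     new_list = []
--     for number in numbers:
--         if any(abs(number-multiple) <= 10 for multiple in multiples_of_670):
--             continue
--         new_list.append(number)
--     return new_list
-- ===== SOURCE B (Python) =====
-- def remove_numbers(numbers):
--     m = max(numbers)
--     out = []
--     for n in numbers:
--         k = (n + 335) // 670  # nearest multiple of 670
--         if k >= 1 and 670 * k < m and abs(n - 670 * k) <= 10: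
--             continue
--         out.append(n)
--     return out
-- ===== Notes on version B (the rewrite author's own statement) =====
-- stated objective: faster
-- what changed: Instead of materialising every multiple of 670 below max(numbers) and scanning that list for each element, B computes for each element its nearest multiple of 670 by rounding division and tests only that one candidate.
import Mathlib
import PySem

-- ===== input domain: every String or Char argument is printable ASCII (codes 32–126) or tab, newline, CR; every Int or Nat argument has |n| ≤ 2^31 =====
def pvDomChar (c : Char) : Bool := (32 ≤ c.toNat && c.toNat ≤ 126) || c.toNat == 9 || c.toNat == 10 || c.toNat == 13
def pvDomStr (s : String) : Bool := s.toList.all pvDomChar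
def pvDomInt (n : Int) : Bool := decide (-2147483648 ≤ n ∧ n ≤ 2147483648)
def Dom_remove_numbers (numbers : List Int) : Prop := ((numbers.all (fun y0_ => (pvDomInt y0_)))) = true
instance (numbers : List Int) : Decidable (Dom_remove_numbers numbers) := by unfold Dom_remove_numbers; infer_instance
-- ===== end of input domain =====

-- B replaces A's scan over all materialised multiples of 670 below max(numbers) by a
-- rounding division that checks the single nearest multiple per element (objective: faster).

-- ===== PORT A =====
def remove_numbers (numbers : List Int) : List Int :=
  match PySem.List.max? numbers (fun x => x) with
  | none => []   -- unreachable: Python's max([]) raises ValueError, excluded by Pre_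
  | some m =>
    let multiples_of_670 := (PySem.List.pyRange 0 m 670).filter (fun i => decide (i ≠ 0))
    numbers.foldl (fun new_list number =>
      if multiples_of_670.any (fun multiple => decide (|number - multiple| ≤ 10)) then
        new_list
      else new_list ++ [number]) []

-- ===== PORT B =====
def remove_numbers_alt (numbers : List Int) : List Int :=
  match PySem.List.max? numbers (fun x => x) with
  | none => []   -- unreachable: Python's max([]) raises ValueError, excluded by Pre_
  | some m =>
    numbers.foldl (fun out n =>
      let k := PySem.Int.floordiv (n + 335) 670
      if decide (1 ≤ k) && decide (670 * k < m) && decide (|n - 670 * k| ≤ 10) then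
        out
      else out ++ [n]) []

-- ===== PRECONDITION & SPEC =====
-- Pre_ excludes only the empty list, on which Python's max() (in both A and B) raises ValueError.
def Pre_remove_numbers (numbers : List Int) : Prop := numbers ≠ []
instance (numbers : List Int) : Decidable (Pre_remove_numbers numbers) := by unfold Pre_remove_numbers; infer_instance
def pvWitness_remove_numbers : List Int := [670, 5]

def Spec_remove_numbers (numbers : List Int) (out : List Int) : Prop := out = remove_numbers_alt numbers
instance (numbers : List Int) (out : List Int) : Decidable (Spec_remove_numbers numbers out) := by unfold Spec_remove_numbers; infer_instance

-- ===== CLAIM (what is proved, stated in full; the proofs are below) =====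
def Claim_equal_remove_numbers : Prop := ∀ (numbers : List Int), Dom_remove_numbers numbers → Pre_remove_numbers numbers → Spec_remove_numbers numbers (remove_numbers numbers)

-- ===== LEMMAS AND PROOFS =====

-- For any n and m, A's "n is within 10 of some listed multiple" test equals B's
-- single-candidate test with k = (n + 335) // 670.
lemma near_eq (m n : Int) :
    ((PySem.List.pyRange 0 m 670).filter (fun i => decide (i ≠ 0))).any
        (fun multiple => decide (|n - multiple| ≤ 10))
      = (decide (1 ≤ PySem.Int.floordiv (n + 335) 670)
          && decide (670 * PySem.Int.floordiv (n + 335) 670 < m)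
          && decide (|n - 670 * PySem.Int.floordiv (n + 335) 670| ≤ 10)) := by
  have hk : PySem.Int.floordiv (n + 335) 670 * 670 ≤ n + 335 ∧
      n + 335 < (PySem.Int.floordiv (n + 335) 670 + 1) * 670 :=
    (PySem.Int.floordiv_eq_iff_of_pos (by norm_num)).mp rfl
  set k := PySem.Int.floordiv (n + 335) 670 with hkdef
  rcases Bool.eq_false_or_eq_true
      ((decide (1 ≤ k) && decide (670 * k < m) && decide (|n - 670 * k| ≤ 10))) with hb | hb
  · rw [hb]
    simp only [Bool.and_eq_true, decide_eq_true_eq] at hb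
    obtain ⟨⟨h1, h2⟩, h3⟩ := hb
    simp only [List.any_eq_true, List.mem_filter, decide_eq_true_eq]
    refine ⟨670 * k, ⟨?_, by omega⟩, abs_le.mpr (by rw [abs_le] at h3; omega)⟩
    rw [PySem.List.mem_pyRange_iff_of_pos (by norm_num)]
    exact ⟨by omega, by omega, ⟨k, by ring⟩⟩
  · rw [hb]
    simp only [List.any_eq_false, List.mem_filter, decide_eq_true_eq]
    rintro x ⟨hx, hx0⟩
    rw [PySem.List.mem_pyRange_iff_of_pos (by norm_num)] at hx
    obtain ⟨hx1, hx2, j, hj⟩ := hx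
    simp only [Bool.and_eq_false_iff, decide_eq_false_iff_not, not_le, not_lt] at hb
    intro habs
    rw [abs_le] at habs
    -- from |n - x| ≤ 10 and x = 670*j we get j = k
    have hjk : j = k := by omega
    have h10 : |n - 670 * k| ≤ 10 := abs_le.mpr (by omega)
    omega

-- folds that skip/append by pointwise-equal predicates are equal
lemma foldl_skip_append_congr (p q : Int → Bool) (l : List Int) (acc : List Int)
    (h : ∀ x, p x = q x) :
    l.foldl (fun a x => if p x then a else a ++ [x]) acc
      = l.foldl (fun a x => if q x then a else a ++ [x]) acc := by
  induction l generalizing acc with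
  | nil => rfl
  | cons x t ih => simp only [List.foldl_cons, h x]; exact ih _

-- ===== VERDICT (by name: the statement is the Claim_ definition above) =====
theorem remove_numbers_spec : Claim_equal_remove_numbers := by
  intro numbers _ _
  unfold Spec_remove_numbers remove_numbers remove_numbers_alt
  cases h : PySem.List.max? numbers (fun x => x) with
  | none => rfl
  | some m =>
    simp only
    exact foldl_skip_append_congr _ _ numbers [] (fun n => near_eq m n)
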